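/- GENERATED by farm/mkstatement.py from design/units.tsv (unit `malloc`) and the Specs of Vorbis/Spec/*.lean — do not edit.
   THE STATEMENT of the proof unit `malloc`: the function `malloc` (2 instructions) satisfies its contract,
   given the contracts of its callees. What the names mean: Vorbis/Spec/Basic.lean. The theorem to prove:
   `theorem malloc_ok : Vorbis.Spec.malloc.Statement`. -/
import Vorbis.Spec.LibcMisc
namespace Vorbis.Spec.malloc
open X86 X86.User Asan

/-- The statement of unit `malloc`. -/
def Statement : Prop :=
  ∀ (Lay : Layout) (_hLay : Lay.hi = 0x1000000) (μ : Microarch) (_hμ : UserX.MicroOK μ) (u₀ : State)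
    (_hcode : HasCodeNat Lay u₀ Vorbis.L.malloc.entry Vorbis.Code.code_malloc.nat Vorbis.L.malloc.size),
    ∀ (others : List Obj) (frames : List (Nat × FrameLayout)), Calls Lay μ Vorbis.WayInv (Vorbis.conv u₀) Vorbis.L.malloc.entry (Vorbis.Spec.malloc.spec others frames)

end Vorbis.Spec.malloc
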